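-- pv_equiv track=rewrite | github.com/ldydek/AGH-WDI | WDI/Set 4/ex.18.py | consistent_sequence
-- ===== SOURCE A (Python) =====
-- def consistent_sequence(arr):
--     n = len(arr)
--     aux_arr = [0] * n
--     for x in range(n):
--         aux_arr[x] = arr[x]
--     for x in range(1, n):
--         aux_arr[x] += aux_arr[x-1]
--     value = 0
--     for x in range(n):
--         for y in range(x, n):
--             if y - x + 1 <= 10:
--                 value = max(value, sum_between_indexes(aux_arr, x, y))
--     return value
--
-- def sum_between_indexes(arr, a, b):
--     if a == 0:
--         return arr[b]
--     return arr[b] - arr[a-1]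
-- ===== SOURCE B (Python) =====
-- def consistent_sequence(arr):
--     best = 0
--     for i in range(len(arr)):
--         s = 0
--         for v in arr[i:i+10]:
--             s += v
--             if s > best:
--                 best = s
--     return best
-- ===== Notes on version B (the rewrite author's own statement) =====
-- stated objective: faster
-- what changed: B drops the prefix-sum array and the quadratic scan over all (x,y) pairs with a length guard; it makes one pass over start indices, accumulating the running sum of the at-most-10-element slice directly, so only O(10n) window sums are ever formed.
import Mathlib
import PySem

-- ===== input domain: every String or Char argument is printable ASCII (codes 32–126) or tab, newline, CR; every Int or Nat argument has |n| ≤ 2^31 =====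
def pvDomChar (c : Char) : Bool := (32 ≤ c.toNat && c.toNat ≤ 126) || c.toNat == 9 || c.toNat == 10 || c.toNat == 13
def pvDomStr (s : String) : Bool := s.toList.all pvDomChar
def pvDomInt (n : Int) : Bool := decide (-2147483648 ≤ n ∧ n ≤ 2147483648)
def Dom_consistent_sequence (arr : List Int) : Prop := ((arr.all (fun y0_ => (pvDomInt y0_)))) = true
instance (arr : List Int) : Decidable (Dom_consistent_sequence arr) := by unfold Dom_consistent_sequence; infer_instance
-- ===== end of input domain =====

-- B replaces A's prefix-sum array and quadratic guarded pair scan by a single pass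
-- accumulating each at-most-10-element window sum directly (objective: faster).

-- ===== PORT A =====
-- every call site in consistent_sequence indexes in range, so the total pyGetD/pySetD forms are exact
def sum_between_indexes (arr : List Int) (a b : Int) : Int :=
  if a = 0 then PySem.List.pyGetD arr b 0
  else PySem.List.pyGetD arr b 0 - PySem.List.pyGetD arr (a - 1) 0

def consistent_sequence (arr : List Int) : Int :=
  let n : Int := PySem.List.len arr
  let aux0 : List Int := List.replicate n.toNat 0
  let aux1 : List Int := (PySem.List.pyRange 0 n 1).foldl
      (fun a x => PySem.List.pySetD a x (PySem.List.pyGetD arr x 0)) aux0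
  let aux : List Int := (PySem.List.pyRange 1 n 1).foldl
      (fun a x => PySem.List.pySetD a x (PySem.List.pyGetD a x 0 + PySem.List.pyGetD a (x - 1) 0)) aux1
  (PySem.List.pyRange 0 n 1).foldl (fun value x =>
    (PySem.List.pyRange x n 1).foldl (fun value y =>
      if y - x + 1 ≤ 10 then max value (sum_between_indexes aux x y) else value) value) 0

-- ===== PORT B =====
def consistent_sequence_alt (arr : List Int) : Int :=
  (PySem.List.pyRange 0 (PySem.List.len arr) 1).foldl (fun best i =>
    ((PySem.List.slice arr (some i) (some (i + 10))).foldl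
      (fun (p : Int × Int) v =>
        let s := p.1 + v
        (s, if s > p.2 then s else p.2)) (0, best)).2) 0

-- ===== PRECONDITION & SPEC =====
def Spec_consistent_sequence (arr : List Int) (out : Int) : Prop := out = consistent_sequence_alt arr
instance (arr : List Int) (out : Int) : Decidable (Spec_consistent_sequence arr out) := by unfold Spec_consistent_sequence; infer_instance

-- ===== CLAIM (what is proved, stated in full; the proofs are below) =====
def Claim_equal_consistent_sequence : Prop := ∀ (arr : List Int), Dom_consistent_sequence arr → Spec_consistent_sequence arr (consistent_sequence arr)

-- ===== LEMMAS AND PROOFS =====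

-- prefix-sum list: pv_pre arr[k] = sum of arr[0..k]
def pv_pre (arr : List Int) : List Int :=
  (List.range arr.length).map (fun k => (arr.take (k + 1)).sum)

-- B's inner running sums: pv_partials s l = [s + sum of l[0..j] for each j]
def pv_partials (s : Int) : List Int → List Int
  | [] => []
  | v :: l => (s + v) :: pv_partials (s + v) l

theorem pv_pre_length (arr : List Int) : (pv_pre arr).length = arr.length := by
  simp [pv_pre]

theorem pv_pre_getElem (arr : List Int) (k : Nat) (hk : k < arr.length) :
    (pv_pre arr)[k]'(by simp [pv_pre_length, hk]) = (arr.take (k + 1)).sum := by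
  simp [pv_pre]

theorem pv_copy_aux (arr : List Int) (m : Nat) (hm : m ≤ arr.length) (a : List Int) (ha : a.length = arr.length) :
    (PySem.List.pyRange 0 (m:Int) 1).foldl (fun a x => PySem.List.pySetD a x (PySem.List.pyGetD arr x 0)) a
      = arr.take m ++ a.drop m := by
  induction m with
  | zero => simp [PySem.List.pyRange_one_eq_nil]
  | succ m ih =>
      have h1 : ((m+1 : Nat) : Int) = (m : Int) + 1 := by push_cast; ring
      rw [h1, PySem.List.pyRange_one_succ_right (by positivity), List.foldl_append,
          ih (by omega)]
      simp only [List.foldl_cons, List.foldl_nil]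
      have hm' : m < arr.length := by omega
      have hma : m < a.length := by omega
      rw [PySem.List.pySetD_natCast]
      have hlen : (arr.take m).length = m := by simp [List.length_take]; omega
      have hda : a.drop m = a[m] :: a.drop (m+1) := List.drop_eq_getElem_cons hma
      rw [hda]
      have : (arr.take m ++ a[m] :: a.drop (m+1)).set m (PySem.List.pyGetD arr (m:Int) 0)
           = arr.take m ++ (PySem.List.pyGetD arr (m:Int) 0) :: a.drop (m+1) := by
        rw [List.set_append]
        rw [hlen, if_neg (lt_irrefl m), Nat.sub_self, List.set_cons_zero]
      rw [this]
      have hg : PySem.List.pyGetD arr (m:Int) 0 = arr[m] := by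
        simp [PySem.List.pyGetD_natCast, List.getD_eq_getElem?_getD, hm']
      rw [hg]
      have ht : arr.take (m+1) = (arr.take m).concat arr[m] := (List.take_concat_get (l:=arr) (i:=m) (h:=hm')).symm
      rw [ht, List.concat_eq_append, List.append_assoc, List.singleton_append]

theorem pv_prefix_aux (arr : List Int) (m : Nat) (h1 : 1 ≤ m) (hm : m ≤ arr.length) :
    (PySem.List.pyRange 1 (m:Int) 1).foldl
      (fun a x => PySem.List.pySetD a x (PySem.List.pyGetD a x 0 + PySem.List.pyGetD a (x - 1) 0)) arr
    = (pv_pre arr).take m ++ arr.drop m := by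
  induction m with
  | zero => omega
  | succ m ih =>
      by_cases hm1 : m = 0
      · subst hm1
        rw [show ((1:Nat):Int) = 1 by norm_num, PySem.List.pyRange_one_eq_nil (by norm_num)]
        simp only [List.foldl_nil]
        obtain ⟨a0, t, rfl⟩ : ∃ a0 t, arr = a0 :: t := by
          cases arr with
          | nil => simp at hm
          | cons a0 t => exact ⟨a0, t, rfl⟩
        simp [pv_pre, List.range_succ_eq_map]
      · have hmge : 1 ≤ m := by omega
        have hmlt : m < arr.length := by omega
        have hc : ((m+1 : Nat) : Int) = (m : Int) + 1 := by push_cast; ring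
        rw [hc, PySem.List.pyRange_one_succ_right (by exact_mod_cast hmge), List.foldl_append,
            ih hmge (by omega)]
        simp only [List.foldl_cons, List.foldl_nil]
        set acc := (pv_pre arr).take m ++ arr.drop m with hacc
        have hlt : (pv_pre arr).length = arr.length := pv_pre_length arr
        have hltk : ((pv_pre arr).take m).length = m := by simp [hlt]; omega
        have hg1 : PySem.List.pyGetD acc (m:Int) 0 = arr[m] := by
          rw [PySem.List.pyGetD_natCast, hacc]
          rw [List.getD_eq_getElem?_getD, List.getElem?_append_right (by omega)]
          rw [hltk, Nat.sub_self, List.getElem?_drop]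
          simp [List.getElem?_eq_getElem hmlt]
        have hg2 : PySem.List.pyGetD acc ((m:Int) - 1) 0 = (arr.take m).sum := by
          have hc2 : (m:Int) - 1 = ((m-1 : Nat) : Int) := by omega
          rw [hc2, PySem.List.pyGetD_natCast, hacc]
          rw [List.getD_eq_getElem?_getD, List.getElem?_append_left (by omega)]
          rw [List.getElem?_take_of_lt (by omega)]
          have : (pv_pre arr)[m-1]?.getD 0 = (arr.take m).sum := by
            rw [List.getElem?_eq_getElem (by omega), Option.getD_some,
                pv_pre_getElem arr (m-1) (by omega)]
            congr 2
            omega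
          simpa using this
        rw [hg1, hg2]
        have hset : PySem.List.pySetD acc (m:Int) (arr[m] + (arr.take m).sum)
            = (pv_pre arr).take (m+1) ++ arr.drop (m+1) := by
          rw [PySem.List.pySetD_natCast, hacc]
          rw [List.set_append, if_neg (by omega), hltk, Nat.sub_self]
          have hda : arr.drop m = arr[m] :: arr.drop (m+1) := List.drop_eq_getElem_cons hmlt
          rw [hda, List.set_cons_zero]
          have ht : (pv_pre arr).take (m+1) = ((pv_pre arr).take m).concat ((pv_pre arr)[m]'(by omega)) :=
            (List.take_concat_get (l := pv_pre arr) (i := m) (h := by omega)).symm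
          rw [ht, List.concat_eq_append, List.append_assoc, List.singleton_append]
          congr 2
          rw [pv_pre_getElem arr m hmlt]
          have := List.sum_take_succ arr m hmlt
          omega
        rw [hset]

theorem pv_sbi (arr : List Int) (x y : Int) (hx : 0 ≤ x) (hxy : x ≤ y) (hy : y < arr.length) :
    sum_between_indexes (pv_pre arr) x y
      = (arr.take (y.toNat + 1)).sum - (arr.take x.toNat).sum := by
  have hy0 : 0 ≤ y := le_trans hx hxy
  have hyn : y.toNat < arr.length := by omega
  have hgy : PySem.List.pyGetD (pv_pre arr) y 0 = (arr.take (y.toNat + 1)).sum := by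
    rw [PySem.List.pyGetD_eq_getElem _ _ hy0 (by rw [pv_pre_length]; exact_mod_cast hy)]
    exact pv_pre_getElem arr y.toNat hyn
  unfold sum_between_indexes
  by_cases h0 : x = 0
  · simp [h0, hgy]
  · rw [if_neg h0, hgy]
    have hx1 : 1 ≤ x := by omega
    have hgx : PySem.List.pyGetD (pv_pre arr) (x - 1) 0 = (arr.take x.toNat).sum := by
      rw [PySem.List.pyGetD_eq_getElem _ _ (by omega) (by rw [pv_pre_length]; omega)]
      have hidx : (x - 1).toNat = x.toNat - 1 := by omega
      simp only [hidx]
      rw [pv_pre_getElem arr (x.toNat - 1) (by omega)]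
      congr 2
      omega
    rw [hgx]

theorem pv_foldl_guard (l : List Int) (c : Int → Prop) [DecidablePred c] (s : Int → Int) (v : Int) :
    l.foldl (fun v y => if c y then max v (s y) else v) v
      = ((l.filter (fun y => decide (c y))).map s).foldl max v := by
  induction l generalizing v with
  | nil => rfl
  | cons a l ih =>
      by_cases h : c a <;> simp [h, ih]

theorem pv_partials_snd (l : List Int) (s b : Int) :
    (l.foldl (fun (p : Int × Int) v =>
        (p.1 + v, if p.1 + v > p.2 then p.1 + v else p.2)) (s, b)).2
      = (pv_partials s l).foldl max b := by
  induction l generalizing s b with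
  | nil => rfl
  | cons v l ih =>
      simp only [List.foldl_cons, pv_partials]
      rw [ih]
      congr 1
      by_cases h : s + v > b
      · simp [h, max_eq_right (le_of_lt h)]
      · simp [h, max_eq_left (by omega : s + v ≤ b)]

theorem pv_partials_length (s : Int) (l : List Int) : (pv_partials s l).length = l.length := by
  induction l generalizing s with
  | nil => rfl
  | cons v l ih => simp [pv_partials, ih]

theorem pv_partials_getElem (s : Int) (l : List Int) (j : Nat) (hj : j < l.length) :
    (pv_partials s l)[j]'(by rw [pv_partials_length]; exact hj) = s + (l.take (j + 1)).sum := by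
  induction l generalizing s j with
  | nil => simp at hj
  | cons v l ih =>
      cases j with
      | zero => simp [pv_partials]
      | succ j =>
          simp only [pv_partials, List.getElem_cons_succ, List.take_succ_cons, List.sum_cons]
          rw [ih (s + v) j (by simpa using hj)]
          ring

theorem pv_filter (arr : List Int) (x : Int) (hxn : x < arr.length) :
    (PySem.List.pyRange x (PySem.List.len arr) 1).filter (fun y => decide (y - x + 1 ≤ 10))
      = PySem.List.pyRange x (min (PySem.List.len arr) (x + 10)) 1 := by
  have hsplit := PySem.List.pyRange_one_append x (min (PySem.List.len arr) (x + 10)) (PySem.List.len arr)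
    (by simp [PySem.List.len_eq]; omega) (by simp)
  rw [hsplit, List.filter_append]
  have h1 : (PySem.List.pyRange x (min (PySem.List.len arr) (x + 10)) 1).filter (fun y => decide (y - x + 1 ≤ 10))
      = PySem.List.pyRange x (min (PySem.List.len arr) (x + 10)) 1 := by
    apply List.filter_eq_self.mpr
    intro y hy
    rw [PySem.List.mem_pyRange_one] at hy
    simp only [decide_eq_true_eq]
    omega
  have h2 : (PySem.List.pyRange (min (PySem.List.len arr) (x + 10)) (PySem.List.len arr) 1).filter
      (fun y => decide (y - x + 1 ≤ 10)) = [] := by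
    apply List.filter_eq_nil_iff.mpr
    intro y hy
    rw [PySem.List.mem_pyRange_one] at hy
    simp only [decide_eq_true_eq]
    omega
  rw [h1, h2, List.append_nil]

-- sum of a chunk via prefix sums
theorem pv_chunk_sum (arr : List Int) (a k : Nat) :
    ((arr.drop a).take k).sum = (arr.take (a + k)).sum - (arr.take a).sum := by
  rw [List.take_add, List.sum_append]
  ring

theorem pv_window_eq (arr : List Int) (i : Int) (hi : 0 ≤ i) (hin : i < arr.length) :
    (PySem.List.pyRange i (min (PySem.List.len arr) (i + 10)) 1).map
        (fun y => sum_between_indexes (pv_pre arr) i y)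
      = pv_partials 0 (PySem.List.slice arr (some i) (some (i + 10))) := by
  have hslice : PySem.List.slice arr (some i) (some (i + 10)) = (arr.drop i.toNat).take 10 := by
    rw [PySem.List.slice_toNat arr hi (by omega)]
    congr 1
    omega
  rw [hslice]
  have hlen10 : ((arr.drop i.toNat).take 10).length = min 10 (arr.length - i.toNat) := by
    simp [List.length_take, List.length_drop]
  apply List.ext_getElem
  · rw [pv_partials_length, List.length_map, PySem.List.length_pyRange_one, hlen10,
        PySem.List.len_eq]
    omega
  · intro j h1 h2
    rw [List.getElem_map, PySem.List.getElem_pyRange_one]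
    rw [pv_partials_getElem _ _ j (by rw [pv_partials_length] at h2; exact h2)]
    have hjlen : j < min 10 (arr.length - i.toNat) := by
      rw [pv_partials_length, hlen10] at h2; exact h2
    have hj10 : j + 1 ≤ 10 := by omega
    rw [List.take_take, Nat.min_eq_left hj10, pv_chunk_sum]
    rw [pv_sbi arr i (i + j) hi (by omega)
        (by rw [List.length_map, PySem.List.length_pyRange_one, PySem.List.len_eq] at h1; omega)]
    have : (i + (j:Int)).toNat = i.toNat + j := by omega
    rw [this, zero_add, show i.toNat + (j + 1) = i.toNat + j + 1 by omega]

theorem pv_main (arr : List Int) : consistent_sequence arr = consistent_sequence_alt arr := by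
  by_cases hnil : arr = []
  · subst hnil; decide
  · have hlen1 : 1 ≤ arr.length := by
      cases arr with
      | nil => simp at hnil
      | cons a t => simp
    unfold consistent_sequence consistent_sequence_alt
    simp only [PySem.List.len_eq, Int.toNat_natCast]
    have hcopy : (PySem.List.pyRange 0 (arr.length:Int) 1).foldl
        (fun a x => PySem.List.pySetD a x (PySem.List.pyGetD arr x 0))
        (List.replicate arr.length 0) = arr := by
      rw [pv_copy_aux arr arr.length le_rfl _ (by simp)]
      simp
    rw [hcopy]
    have hpre : (PySem.List.pyRange 1 (arr.length:Int) 1).foldl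
        (fun a x => PySem.List.pySetD a x (PySem.List.pyGetD a x 0 + PySem.List.pyGetD a (x - 1) 0))
        arr = pv_pre arr := by
      rw [pv_prefix_aux arr arr.length hlen1 le_rfl]
      simp [List.take_of_length_le (le_of_eq (pv_pre_length arr))]
    rw [hpre]
    apply PySem.List.foldl_congr_mem'
    intro x hx v
    rw [PySem.List.mem_pyRange_one] at hx
    rw [pv_foldl_guard _ (fun y => y - x + 1 ≤ 10)]
    rw [← PySem.List.len_eq arr]
    rw [pv_filter arr x (by exact_mod_cast hx.2),
        pv_window_eq arr x hx.1 (by exact_mod_cast hx.2), pv_partials_snd]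

-- ===== VERDICT (by name: the statement is the Claim_ definition above) =====
theorem consistent_sequence_spec : Claim_equal_consistent_sequence := by
  intro arr _
  exact pv_main arr
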